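-- pv_equiv track=rewrite | github.com/renandiiias/build-automated-outreach | scripts/run_campaign_window.py | _pick_country_for_block
-- ===== SOURCE A (Python) =====
-- def _pick_country_for_block(countries: list[str], counts: dict[str, int], block_size: int) -> str:
--     if not countries:
--         return ""
--     floors = {cc: counts.get(cc, 0) // max(1, block_size) for cc in countries}
--     min_floor = min(floors.values())
--     threshold = (min_floor + 1) * max(1, block_size)
--     for cc in countries:
--         if counts.get(cc, 0) < threshold:
--             return cc
--     return countries[0]
-- ===== SOURCE B (Python) =====
-- def _pick_country_for_block(countries: list[str], counts: dict[str, int], block_size: int) -> str: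
--     if not countries:
--         return ""
--     bs = max(1, block_size)
--     return min(countries, key=lambda cc: counts.get(cc, 0) // bs)
-- ===== Notes on version B (the rewrite author's own statement) =====
-- stated objective: simpler
-- what changed: Drops the floors dict, the min-of-values and the threshold-plus-rescan: B computes the argmin directly with min(countries, key=count//max(1,block_size)), whose first-minimum tie rule reproduces A's first qualifying country.
import Mathlib
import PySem

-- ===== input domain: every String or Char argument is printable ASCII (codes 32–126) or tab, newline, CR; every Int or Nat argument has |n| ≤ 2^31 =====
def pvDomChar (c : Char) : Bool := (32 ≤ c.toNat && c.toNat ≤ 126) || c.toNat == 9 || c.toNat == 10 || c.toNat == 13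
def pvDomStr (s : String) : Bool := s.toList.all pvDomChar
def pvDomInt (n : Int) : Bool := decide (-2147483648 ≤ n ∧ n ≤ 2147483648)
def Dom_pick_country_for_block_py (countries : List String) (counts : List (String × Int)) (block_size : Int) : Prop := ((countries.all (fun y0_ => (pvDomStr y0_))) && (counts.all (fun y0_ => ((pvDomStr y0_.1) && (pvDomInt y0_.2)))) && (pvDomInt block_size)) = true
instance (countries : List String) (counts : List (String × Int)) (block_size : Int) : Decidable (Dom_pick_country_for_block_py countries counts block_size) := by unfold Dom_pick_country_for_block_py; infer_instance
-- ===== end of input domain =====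

-- ===== PORT A =====
-- B replaces A's floors-dict + min-of-values + threshold rescan by a single argmin pass (objective: simpler).
-- shared helper: Python's counts.get(cc, 0) on the counts dict
def pvCount (counts : List (String × Int)) (cc : String) : Int :=
  (PySem.Dict.mk counts).getD cc 0

def pick_country_for_block_py (countries : List String) (counts : List (String × Int)) (block_size : Int) : String :=
  if countries = [] then ""
  else
    let floors : PySem.Dict String Int :=
      countries.foldl (fun d cc => d.insert cc (PySem.Int.floordiv (pvCount counts cc) (max 1 block_size))) PySem.Dict.empty
    let min_floor : Int := (PySem.List.min? floors.values (fun v => v)).getD 0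
    let threshold : Int := (min_floor + 1) * max 1 block_size
    match countries.find? (fun cc => decide (pvCount counts cc < threshold)) with
    | some cc => cc
    | none => countries.headD ""

-- ===== PORT B =====
def pick_country_for_block_py_alt (countries : List String) (counts : List (String × Int)) (block_size : Int) : String :=
  if countries = [] then ""
  else
    match PySem.List.min? countries (fun cc => PySem.Int.floordiv (pvCount counts cc) (max 1 block_size)) with
    | some cc => cc
    | none => ""    -- unreachable: countries is nonempty here

-- ===== PRECONDITION & SPEC =====
def Spec_pick_country_for_block_py (countries : List String) (counts : List (String × Int)) (block_size : Int) (out : String) : Prop := out = pick_country_for_block_py_alt countries counts block_size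
instance (countries : List String) (counts : List (String × Int)) (block_size : Int) (out : String) : Decidable (Spec_pick_country_for_block_py countries counts block_size out) := by unfold Spec_pick_country_for_block_py; infer_instance

-- ===== CLAIM (what is proved, stated in full; the proofs are below) =====
def Claim_equal_pick_country_for_block_py : Prop := ∀ (countries : List String) (counts : List (String × Int)) (block_size : Int), Dom_pick_country_for_block_py countries counts block_size → Spec_pick_country_for_block_py countries counts block_size (pick_country_for_block_py countries counts block_size)

-- ===== LEMMAS AND PROOFS =====

-- the step function of PySem.List.min? (named so we can induct on the fold)
def pvStep {A : Type} (key : A → Int) (acc : Option A) (x : A) : Option A :=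
  match acc with
  | none => some x
  | some m => if key x < key m then some x else some m

theorem pvMin?_cons {A : Type} (key : A → Int) (x : A) (t : List A) :
    PySem.List.min? (x :: t) key = t.foldl (pvStep key) (some x) := rfl

-- the running first-min is a lower bound of the start and of everything scanned
theorem pvFold_le {A : Type} (key : A → Int) (t : List A) :
    ∀ (a c : A), t.foldl (pvStep key) (some a) = some c →
      key c ≤ key a ∧ ∀ y ∈ t, key c ≤ key y := by
  induction t with
  | nil =>
    intro a c h
    simp only [List.foldl] at h
    injection h with h
    subst h
    simp
  | cons x t ih =>
    intro a c h
    simp only [List.foldl] at h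
    by_cases hx : key x < key a
    · simp only [pvStep, if_pos hx] at h
      obtain ⟨h1, h2⟩ := ih x c h
      refine ⟨le_trans h1 (le_of_lt hx), ?_⟩
      intro y hy
      rcases List.mem_cons.mp hy with rfl | hy'
      · exact h1
      · exact h2 _ hy'
    · simp only [pvStep, if_neg hx] at h
      obtain ⟨h1, h2⟩ := ih a c h
      refine ⟨h1, ?_⟩
      intro y hy
      rcases List.mem_cons.mp hy with rfl | hy'
      · exact le_trans h1 (le_of_not_gt hx)
      · exact h2 _ hy'

-- the first-min of a :: t is the first element of a :: t whose key is ≤ the minimum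
theorem pvFold_find {A : Type} (key : A → Int) (t : List A) :
    ∀ (a c : A), t.foldl (pvStep key) (some a) = some c →
      (a :: t).find? (fun y => decide (key y ≤ key c)) = some c := by
  induction t with
  | nil =>
    intro a c h
    simp only [List.foldl] at h
    injection h with h
    subst h
    simp [List.find?]
  | cons x t ih =>
    intro a c h
    simp only [List.foldl] at h
    by_cases hx : key x < key a
    · simp only [pvStep, if_pos hx] at h
      have hcx : key c ≤ key x := (pvFold_le key t x c h).1
      have hpa : decide (key a ≤ key c) = false := by
        simp only [decide_eq_false_iff_not, not_le]
        omega
      rw [List.find?, hpa]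
      exact ih x c h
    · simp only [pvStep, if_neg hx] at h
      have hca : key c ≤ key a := (pvFold_le key t a c h).1
      have hax : key a ≤ key x := le_of_not_gt hx
      have hrec := ih a c h
      rw [List.find?] at hrec
      by_cases hpa : key a ≤ key c
      · have hd : decide (key a ≤ key c) = true := decide_eq_true hpa
        rw [hd] at hrec
        rw [List.find?, hd]
        exact hrec
      · have hd : decide (key a ≤ key c) = false := decide_eq_false hpa
        rw [hd] at hrec
        have hpx : decide (key x ≤ key c) = false := by
          simp only [decide_eq_false_iff_not, not_le]
          omega
        rw [List.find?, hd, List.find?, hpx]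
        exact hrec

theorem pvMin?_find {A : Type} (key : A → Int) (xs : List A) (c : A)
    (h : PySem.List.min? xs key = some c) :
    xs.find? (fun y => decide (key y ≤ key c)) = some c := by
  cases xs with
  | nil => simp [PySem.List.min?, List.foldl] at h
  | cons x t =>
    rw [pvMin?_cons] at h
    exact pvFold_find key t x c h

-- a fold of key-determined inserts: lookup of an untouched key
theorem pvGetD_fold_not_mem (g : String → Int) (l : List String) :
    ∀ (d : PySem.Dict String Int) (k : String), k ∉ l →
      (l.foldl (fun d cc => d.insert cc (g cc)) d).getD k 0 = d.getD k 0 := by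
  induction l with
  | nil => intro d k _; rfl
  | cons x t ih =>
    intro d k hk
    simp only [List.foldl]
    rw [ih _ k (fun h => hk (List.mem_cons_of_mem _ h))]
    exact PySem.Dict.getD_insert_of_ne d _ _ (by rintro rfl; exact hk (by simp))

-- a fold of key-determined inserts: lookup of a key in the list
theorem pvGetD_fold_mem (g : String → Int) (l : List String) :
    ∀ (d : PySem.Dict String Int) (k : String), k ∈ l →
      (l.foldl (fun d cc => d.insert cc (g cc)) d).getD k 0 = g k := by
  induction l with
  | nil => intro d k hk; simp at hk
  | cons x t ih =>
    intro d k hk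
    simp only [List.foldl]
    by_cases ht : k ∈ t
    · exact ih _ k ht
    · have hkx : k = x := by
        rcases List.mem_cons.mp hk with h | h
        · exact h
        · exact absurd h ht
      subst hkx
      rw [pvGetD_fold_not_mem g t _ k ht]
      exact PySem.Dict.getD_insert_self d k _ 0

-- x // b ≤ m ↔ x < (m+1)*b, for 0 < b (the threshold test of A is a floor comparison)
theorem pvFloor_le_iff (x m b : Int) (hb : 0 < b) :
    PySem.Int.floordiv x b ≤ m ↔ x < (m + 1) * b := by
  rw [PySem.Int.floordiv_eq_ediv_of_pos hb]
  constructor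
  · intro h
    exact (Int.ediv_lt_iff_lt_mul hb).mp (by omega)
  · intro h
    have := (Int.ediv_lt_iff_lt_mul hb).mpr h
    omega

theorem pick_country_for_block_py_spec : Claim_equal_pick_country_for_block_py := by
  unfold Claim_equal_pick_country_for_block_py
  intro countries counts block_size _dom
  unfold Spec_pick_country_for_block_py
  by_cases hnil : countries = []
  · subst hnil; rfl
  · have hb : (0 : Int) < max 1 block_size := lt_of_lt_of_le Int.zero_lt_one (le_max_left _ _)
    set f : String → Int := fun cc => PySem.Int.floordiv (pvCount counts cc) (max 1 block_size) with hf
    -- B's minimum exists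
    obtain ⟨c, hc⟩ : ∃ c, PySem.List.min? countries f = some c := by
      cases hmc : PySem.List.min? countries f with
      | none => exact absurd ((PySem.List.min?_eq_none_iff countries f).mp hmc) hnil
      | some c => exact ⟨c, rfl⟩
    have hcmem : c ∈ countries := PySem.List.min?_mem hc
    have hcmin : ∀ y ∈ countries, f c ≤ f y := PySem.List.min?_isMin hc
    -- B's value is c
    have hB : pick_country_for_block_py_alt countries counts block_size = c := by
      unfold pick_country_for_block_py_alt
      rw [if_neg hnil, ← hf, hc]
    -- A's floors dict: keys are the distinct countries, each bound to its floor f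
    set floors : PySem.Dict String Int :=
      countries.foldl (fun d cc => d.insert cc (PySem.Int.floordiv (pvCount counts cc) (max 1 block_size))) PySem.Dict.empty with hfl
    have hfold : floors = countries.foldl (fun d cc => d.insert cc (f cc)) PySem.Dict.empty := by
      rw [hfl, hf]
    have hkeys : floors.keys = PySem.Set.ofList countries := by
      rw [hfold, PySem.Dict.keys_foldl_insert]; rfl
    have hnodup : floors.keys.Nodup := by
      rw [hfold]
      exact PySem.Dict.nodup_keys_foldl_insert _ _ _ PySem.Dict.nodup_keys_empty
    have hvals : floors.values = floors.keys.map (fun k => floors.getD k 0) :=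
      PySem.Dict.values_eq_map_keys floors hnodup 0
    have hgetD : ∀ k ∈ countries, floors.getD k 0 = f k := by
      intro k hk
      rw [hfold]
      exact pvGetD_fold_mem f countries PySem.Dict.empty k hk
    have hmemvals : ∀ w ∈ floors.values, ∃ k ∈ countries, w = f k := by
      intro w hw
      rw [hvals] at hw
      obtain ⟨k, hk, hkw⟩ := List.mem_map.mp hw
      have hkc : k ∈ countries := (PySem.Set.mem_ofList countries k).mp (hkeys ▸ hk)
      exact ⟨k, hkc, by rw [← hkw, hgetD k hkc]⟩
    have hfcval : f c ∈ floors.values := by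
      rw [hvals]
      exact List.mem_map.mpr ⟨c, hkeys ▸ (PySem.Set.mem_ofList countries c).mpr hcmem, hgetD c hcmem⟩
    -- A's min_floor equals f c
    obtain ⟨v, hv⟩ : ∃ v, PySem.List.min? floors.values (fun w => w) = some v := by
      cases hmv : PySem.List.min? floors.values (fun w => w) with
      | none =>
        have := (PySem.List.min?_eq_none_iff floors.values _).mp hmv
        rw [this] at hfcval
        simp at hfcval
      | some v => exact ⟨v, rfl⟩
    have hveq : v = f c := by
      obtain ⟨k, hk, hwk⟩ := hmemvals v (PySem.List.min?_mem hv)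
      exact le_antisymm (PySem.List.min?_isMin hv (f c) hfcval) (hwk ▸ hcmin k hk)
    -- the threshold test "count < (min_floor+1)*bs" is exactly "floor ≤ f c"
    have hpred : (fun cc => decide (pvCount counts cc < (v + 1) * max 1 block_size))
               = (fun cc => decide (f cc ≤ f c)) := by
      funext cc
      rw [decide_eq_decide, hveq]
      simp only [hf]
      exact (pvFloor_le_iff (pvCount counts cc) _ _ hb).symm
    have hfind : countries.find? (fun cc => decide (pvCount counts cc < (v + 1) * max 1 block_size)) = some c := by
      rw [hpred]
      exact pvMin?_find f countries c hc
    -- assemble A's value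
    unfold pick_country_for_block_py
    rw [if_neg hnil, ← hfl, hB]
    show (match countries.find? (fun cc => decide (pvCount counts cc <
        ((PySem.List.min? floors.values (fun v => v)).getD 0 + 1) * max 1 block_size)) with
      | some cc => cc
      | none => countries.headD "") = c
    simp only [hv, Option.getD_some, hfind]
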